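-- pv_equiv track=rewrite | github.com/wolfy916/Algorithm | Algorithm_Solution/baekj/bk_7490.py | calculate
-- ===== SOURCE A (Python) =====
-- def calculate(select, N):
--     # [B-1] 공백부터 적용
--     nums = [1]
--     for i in range(N - 1):
--         k = select[i]
--         if k == 2:
--             nums.append(nums.pop() * 10 + i + 2)
--         else:
--             nums.append(i + 2)
--
--     # [B-2] 계산 값이 0인지 확인
--     v = nums.pop(0)
--     for k in select:
--         if k == 2:
--             continue
--         elif k == 1:
--             v -= nums.pop(0)
--         else:
--             v += nums.pop(0)
--
--     return v == 0
-- ===== SOURCE B (Python) =====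
-- def calculate(select, N):
--     total = 0
--     sign = 1
--     cur = 1
--     for k, d in zip(select, range(2, N + 1), strict=True):
--         if k == 2:
--             cur = cur * 10 + d
--         else:
--             total += sign * cur
--             sign = -1 if k == 1 else 1
--             cur = d
--     return total + sign * cur == 0
-- ===== Notes on version B (the rewrite author's own statement) =====
-- stated objective: faster
-- what changed: Replaces A's two passes (build a list of numbers with append/pop, then re-scan select popping from the front to sum) by a single strict-zip pass over (select, range(2, N+1)) keeping only (total, sign, current-number) accumulators, with no intermediate list.
-- outside the precondition, e.g. on calculate([2, 2], 2): A returns False, B raises ValueError; on calculate([2], 1): A returns False, B raises ValueError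
import Mathlib
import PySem

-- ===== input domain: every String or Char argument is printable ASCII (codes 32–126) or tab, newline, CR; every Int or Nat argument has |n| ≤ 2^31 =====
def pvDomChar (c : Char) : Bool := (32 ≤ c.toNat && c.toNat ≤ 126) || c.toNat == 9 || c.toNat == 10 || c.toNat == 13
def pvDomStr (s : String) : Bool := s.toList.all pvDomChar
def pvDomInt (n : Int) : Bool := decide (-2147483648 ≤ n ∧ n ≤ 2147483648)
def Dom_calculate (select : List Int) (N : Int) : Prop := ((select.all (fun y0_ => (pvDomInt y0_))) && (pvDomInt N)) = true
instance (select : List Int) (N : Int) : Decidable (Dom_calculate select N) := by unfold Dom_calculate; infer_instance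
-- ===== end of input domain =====

-- B replaces A's two list-building/popping passes by one (total, sign, cur) accumulator pass
-- over zip(select, range(2, N+1), strict=True); equal on Pre_ (len(select) == N-1, see its comment).

-- ===== PORT A =====
def calculate (select : List Int) (N : Int) : Bool :=
  -- [B-1] build nums by append / pop (pop() = PySem.List.pop? at -1; none = unreachable, nums stays nonempty)
  let nums : List Int :=
    (PySem.List.pyRange 0 (N - 1) 1).foldl (fun nums i =>
      let k := PySem.List.pyGetD select i 0
      if k == 2 then
        match PySem.List.pop? nums (-1) with
        | some (x, rest) => rest ++ [x * 10 + i + 2]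
        | none => nums
      else nums ++ [i + 2]) [1]
  -- [B-2] v = nums.pop(0); then pop from the front per non-2 selector (none = IndexError, excluded by Pre_)
  match PySem.List.pop? nums 0 with
  | none => false
  | some (v, rest) =>
    match select.foldl (fun st k =>
        match st with
        | none => none
        | some (v, rest) =>
          if k == 2 then some (v, rest)
          else if k == 1 then
            match PySem.List.pop? rest 0 with
            | some (n, rest') => some (v - n, rest')
            | none => none
          else
            match PySem.List.pop? rest 0 with
            | some (n, rest') => some (v + n, rest')
            | none => none) (some (v, rest)) with
    | some (v, _) => v == 0
    | none => false

-- ===== PORT B =====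
-- zip(select, range(2, N+1), strict=True): the strict zip raises ValueError on a length
-- mismatch (the port returns false there; those inputs are outside Pre_)
def calculate_alt (select : List Int) (N : Int) : Bool :=
  if select.length = (PySem.List.pyRange 2 (N + 1) 1).length then
    let st :=
      (select.zip (PySem.List.pyRange 2 (N + 1) 1)).foldl (fun (st : Int × Int × Int) kd =>
        match st, kd with
        | (total, sign, cur), (k, d) =>
          if k == 2 then (total, sign, cur * 10 + d)
          else (total + sign * cur, if k == 1 then -1 else 1, d)) (0, 1, 1)
    (st.1 + st.2.1 * st.2.2) == 0
  else false

-- ===== PRECONDITION & SPEC =====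
-- Pre_ excludes (a) inputs where A raises (too-short select, or a non-2 entry past index N-2,
-- where A's second loop pops from an empty list), and (b) over-long select whose extra entries are
-- all 2: the task feeds exactly N-1 operators, A ignoring all-2 extras is accidental, and B's
-- strict zip rejects any length mismatch (raises ValueError there while A returns).
def Pre_calculate (select : List Int) (N : Int) : Prop :=
  select.length = (N - 1).toNat
instance (select : List Int) (N : Int) : Decidable (Pre_calculate select N) := by
  unfold Pre_calculate; infer_instance

def pvWitness_calculate : List Int × Int := ([2, 1, 0, 2], 5)

def Spec_calculate (select : List Int) (N : Int) (out : Bool) : Prop := out = calculate_alt select N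
instance (select : List Int) (N : Int) (out : Bool) : Decidable (Spec_calculate select N out) := by
  unfold Spec_calculate; infer_instance

-- ===== CLAIM (what is proved, stated in full; the proofs are below) =====
def Claim_equal_calculate : Prop := ∀ (select : List Int) (N : Int), Dom_calculate select N → Pre_calculate select N → Spec_calculate select N (calculate select N)

-- ===== LEMMAS AND PROOFS =====

-- sign selected by a non-2 selector value (k==1 subtracts, anything else adds)
def pvSgn (k : Int) : Int := if k == 1 then -1 else 1
-- the non-2 selectors (the ones that close a number)
def pvF (ks : List Int) : List Int := ks.filter (fun k => !(k == 2))
-- signed dot product of a sign list with a value list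
def pvDot (σ vs : List Int) : Int := ((σ.zip vs).map (fun p => p.1 * p.2)).sum
-- total of already-closed signed terms
def pvSumS (ps : List (Int × Int)) : Int := (ps.map (fun p => p.1 * p.2)).sum

theorem pvDot_nil_left (vs : List Int) : pvDot [] vs = 0 := by simp [pvDot]

theorem pvDot_cons (a v : Int) (σ vs : List Int) :
    pvDot (a :: σ) (v :: vs) = a * v + pvDot σ vs := by simp [pvDot]

theorem pvDot_append_last (σ vs : List Int) (s c : Int) (h : σ.length = vs.length) :
    pvDot (σ ++ [s]) (vs ++ [c]) = pvDot σ vs + s * c := by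
  simp [pvDot, List.zip_append h]

theorem pvDot_fst_snd (ps : List (Int × Int)) :
    pvDot (ps.map Prod.fst) (ps.map Prod.snd) = pvSumS ps := by
  simp [pvDot, pvSumS, List.zip_map']

theorem pvSumS_nil : pvSumS [] = 0 := by simp [pvSumS]

theorem pvSumS_cons (p : Int × Int) (ps : List (Int × Int)) :
    pvSumS (p :: ps) = p.1 * p.2 + pvSumS ps := by simp [pvSumS]

theorem pvSumS_append_last (ps : List (Int × Int)) (s c : Int) :
    pvSumS (ps ++ [(s, c)]) = pvSumS ps + s * c := by simp [pvSumS]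

-- A's second loop, run from value v and remaining numbers tail, adds the signed numbers:
theorem phase2_eq (ks : List Int) : ∀ (v : Int) (tail : List Int),
    tail.length = (pvF ks).length →
    ks.foldl (fun st k =>
        match st with
        | none => none
        | some (v, rest) =>
          if k == 2 then some (v, rest)
          else if k == 1 then
            match PySem.List.pop? rest 0 with
            | some (n, rest') => some (v - n, rest')
            | none => none
          else
            match PySem.List.pop? rest 0 with
            | some (n, rest') => some (v + n, rest')
            | none => none) (some (v, tail))
      = some (v + pvDot ((pvF ks).map pvSgn) tail, []) := by
  induction ks with
  | nil =>
    intro v tail h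
    simp [pvF] at h
    subst h
    simp [pvDot_nil_left, pvF]
  | cons k ks ih =>
    intro v tail h
    rw [List.foldl_cons]
    dsimp only
    by_cases hk2 : (k == 2) = true
    · rw [if_pos hk2]
      have hF : pvF (k :: ks) = pvF ks := by simp [pvF, hk2]
      rw [hF] at h ⊢
      exact ih v tail h
    · rw [if_neg hk2]
      have hF : pvF (k :: ks) = k :: pvF ks := by simp [pvF, hk2]
      rw [hF] at h ⊢
      cases tail with
      | nil => simp at h
      | cons n tail' =>
        have h' : tail'.length = (pvF ks).length := by simpa using h
        rw [PySem.List.pop?_zero_cons]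
        by_cases hk1 : (k == 1) = true
        · rw [if_pos hk1]
          dsimp only
          rw [ih (v - n) tail' h']
          simp only [List.map_cons, pvDot_cons, pvSgn, hk1, if_true, Option.some.injEq,
            Prod.mk.injEq, and_true]
          ring
        · rw [if_neg hk1]
          dsimp only
          rw [ih (v + n) tail' h']
          simp only [List.map_cons, pvDot_cons, pvSgn, hk1, Bool.false_eq_true, if_false,
            Option.some.injEq, Prod.mk.injEq, and_true]
          ring

-- A's first loop (on nums = closed values ++ [current]) mirrors B's (total, sign, cur) pass
-- over the corresponding (operator, digit) pairs:
theorem loop1_inv (select : List Int) (l : List Int) :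
    ∀ (ps : List (Int × Int)) (s c : Int),
    ∃ qs : List (Int × Int),
      l.foldl (fun nums i =>
          let k := PySem.List.pyGetD select i 0
          if k == 2 then
            match PySem.List.pop? nums (-1) with
            | some (x, rest) => rest ++ [x * 10 + i + 2]
            | none => nums
          else nums ++ [i + 2]) (ps.map Prod.snd ++ [c])
        = qs.map Prod.snd ++ [((l.map (fun i => (PySem.List.pyGetD select i 0, i + 2))).foldl
            (fun (st : Int × Int × Int) kd =>
              match st, kd with
              | (total, sign, cur), (k, d) =>
                if k == 2 then (total, sign, cur * 10 + d)
                else (total + sign * cur, if k == 1 then -1 else 1, d)) (pvSumS ps, s, c)).2.2]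
      ∧ ((l.map (fun i => (PySem.List.pyGetD select i 0, i + 2))).foldl
            (fun (st : Int × Int × Int) kd =>
              match st, kd with
              | (total, sign, cur), (k, d) =>
                if k == 2 then (total, sign, cur * 10 + d)
                else (total + sign * cur, if k == 1 then -1 else 1, d)) (pvSumS ps, s, c)).1
          = pvSumS qs
      ∧ qs.map Prod.fst ++ [((l.map (fun i => (PySem.List.pyGetD select i 0, i + 2))).foldl
            (fun (st : Int × Int × Int) kd =>
              match st, kd with
              | (total, sign, cur), (k, d) =>
                if k == 2 then (total, sign, cur * 10 + d)
                else (total + sign * cur, if k == 1 then -1 else 1, d)) (pvSumS ps, s, c)).2.1]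
          = ps.map Prod.fst ++ [s]
            ++ (pvF (l.map (fun i => PySem.List.pyGetD select i 0))).map pvSgn := by
  induction l with
  | nil =>
    intro ps s c
    exact ⟨ps, by simp [pvF]⟩
  | cons i l ih =>
    intro ps s c
    simp only [List.foldl_cons, List.map_cons]
    by_cases hk2 : (PySem.List.pyGetD select i 0 == 2) = true
    · rw [if_pos hk2, if_pos hk2, PySem.List.pop?_last]
      dsimp only
      have hc : c * 10 + i + 2 = c * 10 + (i + 2) := by ring
      rw [hc]
      have hF : pvF (PySem.List.pyGetD select i 0 :: l.map (fun i => PySem.List.pyGetD select i 0))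
          = pvF (l.map (fun i => PySem.List.pyGetD select i 0)) := by simp [pvF, hk2]
      rw [hF]
      exact ih ps s (c * 10 + (i + 2))
    · rw [if_neg hk2, if_neg hk2]
      have hF : pvF (PySem.List.pyGetD select i 0 :: l.map (fun i => PySem.List.pyGetD select i 0))
          = PySem.List.pyGetD select i 0 :: pvF (l.map (fun i => PySem.List.pyGetD select i 0)) := by
        simp [pvF, hk2]
      rw [hF]
      obtain ⟨qs, h1, h2, h3⟩ :=
        ih (ps ++ [(s, c)]) (if PySem.List.pyGetD select i 0 == 1 then -1 else 1) (i + 2)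
      rw [pvSumS_append_last] at h1 h2 h3
      refine ⟨qs, ?_, h2, ?_⟩
      · rw [← h1]
        simp
      · rw [h3]
        simp [pvSgn, List.append_assoc]

-- under Pre_ the strict zip is exactly the (operator, digit) pair per index of A's first loop
theorem zip_eq_map_range (select : List Int) (N : Int)
    (hlen : select.length = (N - 1).toNat) :
    select.zip (PySem.List.pyRange 2 (N + 1) 1)
      = (PySem.List.pyRange 0 (N - 1) 1).map (fun i => (PySem.List.pyGetD select i 0, i + 2)) := by
  apply List.ext_getElem
  · simp [PySem.List.length_pyRange_one, hlen]
    omega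
  · intro j h1 h2
    have hj : j < select.length := by
      rw [List.length_zip, PySem.List.length_pyRange_one] at h1
      omega
    rw [List.getElem_zip, List.getElem_map, PySem.List.getElem_pyRange_one,
      PySem.List.getElem_pyRange_one]
    rw [PySem.List.pyGetD_eq_getElem select 0 (by omega) (by omega)]
    have hidx : ((0 : Int) + (j : Int)).toNat = j := by omega
    rw [Prod.mk.injEq]
    exact ⟨by simp only [hidx], by ring⟩

-- ===== VERDICT (by name: the statement is the Claim_ definition above) =====
theorem calculate_spec : Claim_equal_calculate := by
  intro select N _ hpre
  unfold Spec_calculate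
  unfold Pre_calculate at hpre
  obtain ⟨qs, h1, h2, h3⟩ := loop1_inv select (PySem.List.pyRange 0 (N - 1) 1) [] 1 1
  have hsel : (PySem.List.pyRange 0 (N - 1) 1).map (fun i => PySem.List.pyGetD select i 0)
      = select := by
    have h0 := congrArg (List.map Prod.fst) (zip_eq_map_range select N hpre)
    rw [List.map_fst_zip (by rw [PySem.List.length_pyRange_one]; omega),
      List.map_map] at h0
    exact h0.symm
  have hpvF : pvF select
      = pvF ((PySem.List.pyRange 0 (N - 1) 1).map (fun i => PySem.List.pyGetD select i 0)) := by
    rw [hsel]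
  have hcond : select.length = (PySem.List.pyRange 2 (N + 1) 1).length := by
    simp [PySem.List.length_pyRange_one]
    omega
  simp only [List.map_nil, List.nil_append, pvSumS_nil] at h1 h2 h3
  simp only [calculate, calculate_alt]
  rw [if_pos hcond, zip_eq_map_range select N hpre, h1]
  cases qs with
  | nil =>
    simp only [List.map_nil, List.nil_append, List.singleton_append] at h1 h2 h3 ⊢
    rw [PySem.List.pop?_zero_cons]
    dsimp only
    rw [List.cons.injEq] at h3
    obtain ⟨hB21, hmap⟩ := h3
    have hFnil : pvF ((PySem.List.pyRange 0 (N - 1) 1).map (fun i => PySem.List.pyGetD select i 0))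
        = [] := List.map_eq_nil_iff.mp hmap.symm
    rw [phase2_eq select _ [] (by simp [hpvF, hFnil])]
    simp only [hpvF, hFnil, List.map_nil, pvDot_nil_left]
    rw [h2, hB21]
    simp [pvSumS_nil]
  | cons q qs2 =>
    simp only [List.map_cons, List.cons_append, List.nil_append] at h1 h2 h3 ⊢
    rw [PySem.List.pop?_zero_cons]
    dsimp only
    rw [List.cons.injEq] at h3
    obtain ⟨hq1, hrest⟩ := h3
    have hlen2 : (qs2.map Prod.snd ++ [(((PySem.List.pyRange 0 (N - 1) 1).map
          (fun i => (PySem.List.pyGetD select i 0, i + 2))).foldl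
          (fun (st : Int × Int × Int) kd =>
            if (kd.1 == 2) = true then (st.1, st.2.1, st.2.2 * 10 + kd.2)
            else (st.1 + st.2.1 * st.2.2, if (kd.1 == 1) = true then -1 else 1, kd.2))
          (0, 1, 1)).2.2]).length = (pvF select).length := by
      have hl := congrArg List.length hrest
      simp at hl
      simp [hpvF, hl]
    rw [phase2_eq select _ _ hlen2]
    dsimp only
    rw [hpvF, ← hrest]
    rw [pvDot_append_last _ _ _ _ (by simp), pvDot_fst_snd, h2, pvSumS_cons, hq1]
    ring_nf
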